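-- pv_equiv track=rewrite | github.com/pypi-data/pypi-mirror-371 | packages/cursword/cursword-0.1.1.tar.gz/cursword-0.1.1/cursword/cursword.py | get_previous_word_start_position
-- ===== SOURCE A (Python) =====
-- import unicodedata
--
-- UNICODE_MATH_CATEGORY = "Sm"
--
-- UNICODE_MODIFIED_CATEGORY = "Sk"
--
-- def _is_word(c: str) -> bool:
--     return c.isalnum() or c == "_"
--
-- def _is_punc(c: str) -> bool:
--     uc = unicodedata.category(c)
--     return uc.startswith("P") or uc in (
--         UNICODE_MATH_CATEGORY,
--         UNICODE_MODIFIED_CATEGORY,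
--     )
--
-- def _is_currency(c: str) -> bool:
--     uc = unicodedata.category(c)
--     return uc == "Sc"
--
-- CAT_NONE = -1
--
-- CAT_SPACE = 0
--
-- CAT_WORD = 1
--
-- CAT_PUNC = 2
--
-- CAT_CURR = 3
--
-- CAT_OTHER = 4
--
-- def _get_category(c: str) -> int:
--     if c == " ":
--         return CAT_SPACE
--     elif _is_word(c):
--         return CAT_WORD
--     elif _is_punc(c):
--         return CAT_PUNC
--     elif _is_currency(c):
--         return CAT_CURR
--     else:
--         return CAT_OTHER
--
-- def get_previous_word_start_position(text: str, start: int) -> int: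
--     """
--     Find **the start of** previous word in given text.
--     :param text: given text
--     :param start: position from when to start search.
--         If a word starts at this position, it will be ignored.
--     :return: start position of previous word, or 0 if no word found.
--     """
--
--     # Always move to start - 1
--     start = start - 1
--
--     start = min(max(0, start), len(text) - 1)
--     cat = CAT_NONE
--     for i in range(start, -1, -1):
--         local_cat = _get_category(text[i])
--         if cat == CAT_NONE:
--             if local_cat != CAT_SPACE:
--                 cat = local_cat
--         elif local_cat != cat:
--             return i + 1
--     else:
--         return 0
-- ===== SOURCE B (Python) =====
-- import unicodedata
--
-- UNICODE_MATH_CATEGORY = "Sm"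
-- UNICODE_MODIFIED_CATEGORY = "Sk"
--
-- CAT_SPACE = 0
-- CAT_WORD = 1
-- CAT_PUNC = 2
-- CAT_CURR = 3
-- CAT_OTHER = 4
--
--
-- def _category(c: str) -> int:
--     if c == " ":
--         return CAT_SPACE
--     if c.isalnum() or c == "_":
--         return CAT_WORD
--     uc = unicodedata.category(c)
--     if uc.startswith("P") or uc in (UNICODE_MATH_CATEGORY, UNICODE_MODIFIED_CATEGORY):
--         return CAT_PUNC
--     if uc == "Sc":
--         return CAT_CURR
--     return CAT_OTHER
--
--
-- def get_previous_word_start_position(text: str, start: int) -> int: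
--     # Forward single pass (instead of A's backward scan): track the start of the
--     # current constant-category run and the run start of the last non-space char.
--     last = min(max(0, start - 1), len(text) - 1)
--     ans = 0
--     run_start = 0
--     prev = None
--     for j in range(last + 1):
--         c = _category(text[j])
--         if prev is not None and c != prev:
--             run_start = j
--         if c != CAT_SPACE:
--             ans = run_start
--         prev = c
--     return ans
-- ===== Notes on version B (the rewrite author's own statement) =====
-- stated objective: alternative
-- what changed: Replaces A's backward sentinel-state scan from the start index with a single forward pass from the beginning of the text that maintains the start of the current constant-category run and the run start of the last non-space character seen.
import Mathlib
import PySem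

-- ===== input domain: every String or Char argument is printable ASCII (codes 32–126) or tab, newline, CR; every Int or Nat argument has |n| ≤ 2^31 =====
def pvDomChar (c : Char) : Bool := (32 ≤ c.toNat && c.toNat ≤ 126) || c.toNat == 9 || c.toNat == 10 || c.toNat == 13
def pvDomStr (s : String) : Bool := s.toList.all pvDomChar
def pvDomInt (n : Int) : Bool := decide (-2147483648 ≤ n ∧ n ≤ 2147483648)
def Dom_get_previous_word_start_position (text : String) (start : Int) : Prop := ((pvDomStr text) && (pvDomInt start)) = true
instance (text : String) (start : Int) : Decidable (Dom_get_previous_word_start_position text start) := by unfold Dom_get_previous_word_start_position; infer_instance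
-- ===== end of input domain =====

-- B replaces A's backward sentinel-state scan by a single FORWARD pass that tracks the start of
-- the current constant-category run and the run start of the last non-space char; same O(n) cost.

-- ===== PORT A =====
-- _get_category, hand-ported: exact on the ASCII domain (codes 32–126 plus tab/newline/CR),
-- where unicodedata.category gives 'P*'/'Sm'/'Sk' exactly for the listed punctuation chars,
-- 'Sc' exactly for '$', and isalnum coincides with Char.isAlphanum.
def pvGetCat (c : Char) : Int :=
  if c = ' ' then 0
  else if c.isAlphanum || c = '_' then 1
  else if "!\"#%&'()*+,-./:;<=>?@[\\]^`{|}~".toList.contains c then 2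
  else if c = '$' then 3
  else 4

-- A's for-loop over range(start, -1, -1) carrying the sentinel cat state; i is the current index.
def pvLoopA (cs : List Char) : Nat → Int → Int
  | i, cat =>
    let lc := pvGetCat (cs.getD i ' ')
    if cat = -1 then
      let cat' := if lc ≠ 0 then lc else cat
      match i with
      | 0 => 0
      | j + 1 => pvLoopA cs j cat'
    else if lc ≠ cat then (i : Int) + 1
    else
      match i with
      | 0 => 0
      | j + 1 => pvLoopA cs j cat

def get_previous_word_start_position (text : String) (start : Int) : Int :=
  let cs := text.toList
  let s := min (max 0 (start - 1)) ((cs.length : Int) - 1)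
  -- s < 0 exactly when the text is empty: the range is empty and A returns 0.
  if s < 0 then 0 else pvLoopA cs s.toNat (-1)

-- ===== PORT B =====
-- B's forward for-loop over range(last + 1); state (ans, run_start, prev) after processing
-- indices 0..j, processed left to right by structural recursion on j.
def pvFwd (cs : List Char) : Nat → Int × Int × Option Int
  | 0 =>
    let c := pvGetCat (cs.getD 0 ' ')
    ((if c ≠ 0 then 0 else 0), 0, some c)
  | j + 1 =>
    let st := pvFwd cs j
    let c := pvGetCat (cs.getD (j + 1) ' ')
    let rs := if st.2.2.isSome ∧ st.2.2 ≠ some c then ((j : Int) + 1) else st.2.1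
    ((if c ≠ 0 then rs else st.1), rs, some c)

def get_previous_word_start_position_alt (text : String) (start : Int) : Int :=
  let cs := text.toList
  let last := min (max 0 (start - 1)) ((cs.length : Int) - 1)
  -- last < 0 exactly when the text is empty: the range is empty and ans stays 0.
  if last < 0 then 0 else (pvFwd cs last.toNat).1

-- ===== PRECONDITION & SPEC =====
def Spec_get_previous_word_start_position (text : String) (start : Int) (out : Int) : Prop := out = get_previous_word_start_position_alt text start
instance (text : String) (start : Int) (out : Int) : Decidable (Spec_get_previous_word_start_position text start out) := by unfold Spec_get_previous_word_start_position; infer_instance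

-- ===== CLAIM =====
def Claim_equal_get_previous_word_start_position : Prop := ∀ (text : String) (start : Int), Dom_get_previous_word_start_position text start → Spec_get_previous_word_start_position text start (get_previous_word_start_position text start)

-- ===== LEMMAS AND PROOFS =====

-- category of the char at index i (proof-side abbreviation)
def pvCatAt (cs : List Char) (i : Nat) : Int := pvGetCat (cs.getD i ' ')

-- A's loop once it has left the sentinel state: backward scan while category = cat.
def pvScanSame (cs : List Char) (cat : Int) : Nat → Int
  | 0 => if pvCatAt cs 0 ≠ cat then 1 else 0
  | j + 1 => if pvCatAt cs (j + 1) ≠ cat then ((j + 1 : Nat) : Int) + 1 else pvScanSame cs cat j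

-- start index of the constant-category run containing position i
def pvRunStart (cs : List Char) : Nat → Int
  | 0 => 0
  | j + 1 => if pvCatAt cs (j + 1) ≠ pvCatAt cs j then ((j : Int) + 1) else pvRunStart cs j

theorem pvGetCat_ne_neg_one (c : Char) : pvGetCat c ≠ -1 := by
  unfold pvGetCat; split_ifs <;> norm_num

-- Once the sentinel state has been left (cat ≠ -1), A's loop is the backward same-category scan.
theorem pvLoopA_eq_scan (cs : List Char) (cat : Int) (hcat : cat ≠ -1) :
    ∀ i, pvLoopA cs i cat = pvScanSame cs cat i := by
  intro i
  induction i with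
  | zero =>
    rw [pvLoopA, pvScanSame]
    simp [if_neg hcat, pvCatAt]
  | succ j ih =>
    rw [pvLoopA, pvScanSame]
    simp only [if_neg hcat, pvCatAt]
    split_ifs with h
    · push_cast; ring
    · exact ih

-- The backward scan with the category of position j+1 computes that position's run start.
theorem pvScan_eq_runStart (cs : List Char) :
    ∀ j, pvScanSame cs (pvCatAt cs (j + 1)) j = pvRunStart cs (j + 1) := by
  intro j
  induction j with
  | zero =>
    rw [pvScanSame, pvRunStart, pvRunStart]
    by_cases h : pvCatAt cs 1 = pvCatAt cs 0
    · rw [if_neg (not_not_intro h.symm), if_neg (not_not_intro h)]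
    · rw [if_pos (fun e => h e.symm), if_pos h]
      norm_num
  | succ j ih =>
    rw [pvScanSame, pvRunStart]
    by_cases h : pvCatAt cs (j + 1 + 1) = pvCatAt cs (j + 1)
    · rw [if_neg (not_not_intro h.symm), if_neg (not_not_intro h), h]
      exact ih
    · rw [if_pos (fun e => h e.symm), if_pos h]

-- Invariant of B's forward pass: ans is exactly A's answer for a scan clamped at i,
-- run_start is the run start of i, prev is the category at i.
theorem pvFwd_spec (cs : List Char) :
    ∀ i, pvFwd cs i = (pvLoopA cs i (-1), pvRunStart cs i, some (pvCatAt cs i)) := by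
  intro i
  induction i with
  | zero =>
    rw [pvFwd, pvLoopA, pvRunStart]
    simp [pvCatAt]
  | succ j ih =>
    have hA : pvLoopA cs j (pvGetCat (cs.getD (j + 1) ' ')) = pvRunStart cs (j + 1) := by
      have hne : pvGetCat (cs.getD (j + 1) ' ') ≠ -1 := pvGetCat_ne_neg_one _
      rw [pvLoopA_eq_scan cs _ hne j]
      exact pvScan_eq_runStart cs j
    rw [pvFwd, ih, pvLoopA]
    simp only [pvCatAt, List.getD] at hA ⊢
    by_cases hs : pvGetCat (cs[j + 1]?.getD ' ') = 0 <;>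
      by_cases h : pvGetCat (cs[j]?.getD ' ') = pvGetCat (cs[j + 1]?.getD ' ')
    · simp [pvRunStart, pvCatAt, List.getD, hs, h]
    · simp [pvRunStart, pvCatAt, List.getD, hs, fun e => h (Eq.symm e)]
      by_cases hx : pvGetCat (cs[j]?.getD ' ') = 0
      · rw [if_pos hx, if_pos hx.symm]
      · rw [if_neg hx, if_neg (Ne.symm hx)]
    · simp [pvRunStart, pvCatAt, List.getD, hs, h, hA]
    · have h2 : ¬ pvGetCat (cs[j + 1]?.getD ' ') = pvGetCat (cs[j]?.getD ' ') := fun e => h e.symm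
      simp [pvRunStart, pvCatAt, List.getD, hs, h, h2, hA]

-- ===== VERDICT =====
theorem get_previous_word_start_position_spec : Claim_equal_get_previous_word_start_position := by
  intro text start _
  unfold Spec_get_previous_word_start_position
  unfold get_previous_word_start_position get_previous_word_start_position_alt
  simp only []
  split_ifs with h
  · rfl
  · rw [pvFwd_spec]
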